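-- pv_equiv track=rewrite | github.com/niteshrawat1995/MyCodeBase | python/practise/patterns/matrix_inversions.py | col_inv
-- ===== SOURCE A (Python) =====
-- def col_inv(a):
--     count=0
--     for col in range(len(a)):
--         for i in range(len(a[col])):
--             for j in range(i+1,len(a[col])):
--                 if a[i][col] > a[j][col]:
--                     count+=1
--     return count
-- ===== SOURCE B (Python) =====
-- def _sort_count(xs):
--     # merge sort that also counts inversions: pairs (i, j), i < j, xs[i] > xs[j]
--     n = len(xs)
--     if n <= 1:
--         return xs, 0
--     left, cl = _sort_count(xs[:n // 2])
--     right, cr = _sort_count(xs[n // 2:])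
--     merged = []
--     i = j = 0
--     cross = 0
--     while i < len(left) and j < len(right):
--         if left[i] <= right[j]:
--             merged.append(left[i])
--             i += 1
--         else:
--             cross += len(left) - i
--             merged.append(right[j])
--             j += 1
--     merged.extend(left[i:])
--     merged.extend(right[j:])
--     return merged, cl + cr + cross
--
--
-- def col_inv(a):
--     total = 0
--     for col in range(len(a)):
--         m = len(a[col])
--         if m < 2:
--             continue  # fewer than two entries: no inversions in this column
--         column = [a[i][col] for i in range(m)]
--         total += _sort_count(column)[1]
--     return total
-- ===== Notes on version B (the rewrite author's own statement) =====
-- stated objective: faster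
-- what changed: Each column's pair count is computed by merge-sort inversion counting on the column list (built once) instead of the nested i/j index scan.
import Mathlib
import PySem

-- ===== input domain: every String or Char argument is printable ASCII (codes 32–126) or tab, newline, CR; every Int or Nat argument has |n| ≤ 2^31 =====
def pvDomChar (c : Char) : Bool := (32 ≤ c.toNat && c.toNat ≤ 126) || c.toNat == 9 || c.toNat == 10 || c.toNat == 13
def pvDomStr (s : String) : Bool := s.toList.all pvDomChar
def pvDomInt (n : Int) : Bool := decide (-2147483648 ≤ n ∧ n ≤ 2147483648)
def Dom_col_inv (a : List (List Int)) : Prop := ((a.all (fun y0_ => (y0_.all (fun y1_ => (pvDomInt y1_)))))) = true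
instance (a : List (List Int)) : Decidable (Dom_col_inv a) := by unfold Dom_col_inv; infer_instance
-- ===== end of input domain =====

-- B counts each column's inversions by merge sort on the column list instead of A's nested index pair scan.

-- ===== PORT A =====
-- literal transliteration of A's triple loop; pyGetD is exact here because Pre_ keeps every index in range
def col_inv (a : List (List Int)) : Int :=
  (PySem.List.pyRange 0 (a.length : Int) 1).foldl (fun count col =>
    (PySem.List.pyRange 0 ((PySem.List.pyGetD a col []).length : Int) 1).foldl (fun count i =>
      (PySem.List.pyRange (i + 1) ((PySem.List.pyGetD a col []).length : Int) 1).foldl (fun count j =>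
        if PySem.List.pyGetD (PySem.List.pyGetD a i []) col 0 >
           PySem.List.pyGetD (PySem.List.pyGetD a j []) col 0 then count + 1 else count)
        count) count) 0

-- ===== PORT B =====
-- the merge phase of _sort_count (the while loop + the two extends), with its inversion counter
def mergeCnt : List Int → List Int → List Int × Int
  | [], ys => (ys, 0)
  | x :: xs, [] => (x :: xs, 0)
  | x :: xs, y :: ys =>
    if x ≤ y then
      let p := mergeCnt xs (y :: ys); (x :: p.1, p.2)
    else
      let p := mergeCnt (x :: xs) ys; (y :: p.1, p.2 + ((xs.length : Int) + 1))

-- _sort_count: merge sort returning (sorted list, inversion count)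
def sortCount (xs : List Int) : List Int × Int :=
  if h : xs.length ≤ 1 then (xs, 0)
  else
    let l := sortCount (xs.take (xs.length / 2))
    let r := sortCount (xs.drop (xs.length / 2))
    let m := mergeCnt l.1 r.1
    (m.1, l.2 + r.2 + m.2)
termination_by xs.length
decreasing_by
  · simp [List.length_take]; omega
  · simp [List.length_drop]; omega

def col_inv_alt (a : List (List Int)) : Int :=
  (PySem.List.pyRange 0 (a.length : Int) 1).foldl (fun total col =>
    let m := (PySem.List.pyGetD a col []).length
    if m < 2 then total
    else total + (sortCount ((PySem.List.pyRange 0 (m : Int) 1).map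
        (fun i => PySem.List.pyGetD (PySem.List.pyGetD a i []) col 0))).2) 0

-- ===== PRECONDITION & SPEC =====
-- Pre_ is exactly the set of inputs on which A returns: it excludes precisely the inputs where
-- some access a[i][col] / a[j][col] of A's pair loops is out of range (IndexError).
def Pre_col_inv (a : List (List Int)) : Prop :=
  ∀ c < a.length, ∀ j < (a.getD c []).length, ∀ i < j,
    j < a.length ∧ c < (a.getD i []).length ∧ c < (a.getD j []).length
instance (a : List (List Int)) : Decidable (Pre_col_inv a) := by unfold Pre_col_inv; infer_instance
def pvWitness_col_inv : List (List Int) := [[3, 1, 2], [2, 0, 5], [1, 4, 0]]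
def Spec_col_inv (a : List (List Int)) (out : Int) : Prop := out = col_inv_alt a
instance (a : List (List Int)) (out : Int) : Decidable (Spec_col_inv a out) := by unfold Spec_col_inv; infer_instance

-- ===== CLAIM (what is proved, stated in full; the proofs are below) =====
def Claim_equal_col_inv : Prop := ∀ (a : List (List Int)), Dom_col_inv a → Pre_col_inv a → Spec_col_inv a (col_inv a)

-- ===== LEMMAS AND PROOFS =====

-- number of inversions of a list, by structural recursion (the common spec both ports are reduced to)
def invN : List Int → Nat
  | [] => 0
  | x :: xs => xs.countP (fun y => decide (y < x)) + invN xs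

-- cross inversions between two blocks
def crossN (l r : List Int) : Nat := (l.map (fun x => r.countP (fun y => decide (y < x)))).sum

theorem crossN_nil_right (l : List Int) : crossN l [] = 0 := by
  induction l with
  | nil => rfl
  | cons x xs ih => simp [crossN] at *

theorem crossN_cons_left (x : Int) (l r : List Int) :
    crossN (x :: l) r = r.countP (fun y => decide (y < x)) + crossN l r := by
  simp [crossN]

theorem crossN_cons_right (l : List Int) (y : Int) (ys : List Int) :
    crossN l (y :: ys) = l.countP (fun x => decide (y < x)) + crossN l ys := by
  induction l with
  | nil => simp [crossN]
  | cons x xs ih =>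
    rw [crossN_cons_left, ih, List.countP_cons, crossN_cons_left, List.countP_cons]
    split_ifs <;> omega

theorem invN_append (u w : List Int) : invN (u ++ w) = invN u + invN w + crossN u w := by
  induction u with
  | nil => simp [invN, crossN]
  | cons x xs ih => simp [invN, crossN_cons_left, List.countP_append, ih]; ring

theorem crossN_perm_left {l l' : List Int} (h : l.Perm l') (r : List Int) : crossN l r = crossN l' r := by
  unfold crossN
  exact (h.map _).sum_eq

theorem crossN_perm_right (l : List Int) {r r' : List Int} (h : r.Perm r') : crossN l r = crossN l r' := by
  unfold crossN
  congr 1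
  exact List.map_congr_left (fun x _ => h.countP_eq _)

theorem mergeCnt_perm (l r : List Int) : (mergeCnt l r).1.Perm (l ++ r) := by
  induction l, r using mergeCnt.induct with
  | case1 ys => simp [mergeCnt]
  | case2 x xs => simp [mergeCnt]
  | case3 x xs y ys h ih =>
    simp only [mergeCnt, if_pos h]
    exact ih.cons x
  | case4 x xs y ys h ih =>
    simp only [mergeCnt, if_neg h]
    exact (ih.cons y).trans List.perm_middle.symm

theorem mergeCnt_sorted : ∀ (l r : List Int), l.Pairwise (· ≤ ·) → r.Pairwise (· ≤ ·) →
    (mergeCnt l r).1.Pairwise (· ≤ ·) := by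
  intro l r
  induction l, r using mergeCnt.induct with
  | case1 ys => intro _ h; simpa [mergeCnt] using h
  | case2 x xs => intro h _; simpa [mergeCnt] using h
  | case3 x xs y ys h ih =>
    intro hl hr
    simp only [mergeCnt, if_pos h]
    obtain ⟨hx, hxs⟩ := List.pairwise_cons.mp hl
    refine List.pairwise_cons.mpr ⟨?_, ih hxs hr⟩
    intro z hz
    rcases List.mem_append.mp ((mergeCnt_perm xs (y :: ys)).mem_iff.mp hz) with h1 | h2
    · exact hx z h1
    · rcases List.mem_cons.mp h2 with rfl | h3
      · exact h
      · exact h.trans ((List.pairwise_cons.mp hr).1 z h3)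
  | case4 x xs y ys h ih =>
    intro hl hr
    simp only [mergeCnt, if_neg h]
    obtain ⟨hy, hys⟩ := List.pairwise_cons.mp hr
    have hyx : y ≤ x := le_of_lt (lt_of_not_ge h)
    refine List.pairwise_cons.mpr ⟨?_, ih hl hys⟩
    intro z hz
    rcases List.mem_append.mp ((mergeCnt_perm (x :: xs) ys).mem_iff.mp hz) with h1 | h2
    · rcases List.mem_cons.mp h1 with rfl | h3
      · exact hyx
      · exact hyx.trans ((List.pairwise_cons.mp hl).1 z h3)
    · exact hy z h2

theorem mergeCnt_count : ∀ (l r : List Int), l.Pairwise (· ≤ ·) → r.Pairwise (· ≤ ·) →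
    (mergeCnt l r).2 = (crossN l r : Int) := by
  intro l r
  induction l, r using mergeCnt.induct with
  | case1 ys => intro _ _; simp [mergeCnt, crossN]
  | case2 x xs => intro _ _; simp [mergeCnt, crossN_nil_right]
  | case3 x xs y ys h ih =>
    intro hl hr
    simp only [mergeCnt, if_pos h]
    obtain ⟨hx, hxs⟩ := List.pairwise_cons.mp hl
    have hz : (y :: ys).countP (fun z => decide (z < x)) = 0 := by
      refine List.countP_eq_zero.mpr ?_
      intro z hzm
      rcases List.mem_cons.mp hzm with rfl | h3
      · simp; exact h
      · simp; exact h.trans ((List.pairwise_cons.mp hr).1 z h3)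
    rw [ih hxs hr, crossN_cons_left, hz]
    simp
  | case4 x xs y ys h ih =>
    intro hl hr
    simp only [mergeCnt, if_neg h]
    obtain ⟨hy, hys⟩ := List.pairwise_cons.mp hr
    have hyx : y < x := lt_of_not_ge h
    have hfull : (x :: xs).countP (fun z => decide (y < z)) = (x :: xs).length := by
      refine List.countP_eq_length.mpr ?_
      intro z hzm
      rcases List.mem_cons.mp hzm with rfl | h3
      · simpa using hyx
      · simpa using hyx.trans_le ((List.pairwise_cons.mp hl).1 z h3)
    rw [ih hl hys, crossN_cons_right, hfull]
    simp only [List.length_cons]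
    push_cast
    ring

theorem sortCount_main (xs : List Int) :
    (sortCount xs).1.Perm xs ∧ (sortCount xs).1.Pairwise (· ≤ ·) ∧ (sortCount xs).2 = (invN xs : Int) := by
  induction xs using sortCount.induct with
  | case1 xs h =>
    rw [sortCount, dif_pos h]
    match xs, h with
    | [], _ => exact ⟨List.Perm.refl _, by simp, by simp [invN]⟩
    | [x], _ => exact ⟨List.Perm.refl _, by simp, by simp [invN]⟩
  | case2 xs h ih1 ih2 =>
    rw [sortCount, dif_neg h]
    dsimp only
    obtain ⟨p1, s1, c1⟩ := ih1
    obtain ⟨p2, s2, c2⟩ := ih2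
    have hsplit : invN xs = invN (xs.take (xs.length / 2)) + invN (xs.drop (xs.length / 2)) +
        crossN (xs.take (xs.length / 2)) (xs.drop (xs.length / 2)) := by
      conv_lhs => rw [← List.take_append_drop (xs.length / 2) xs]
      exact invN_append _ _
    refine ⟨?_, mergeCnt_sorted _ _ s1 s2, ?_⟩
    · exact (mergeCnt_perm _ _).trans ((p1.append p2).trans (by rw [List.take_append_drop]))
    · rw [mergeCnt_count _ _ s1 s2, crossN_perm_left p1, crossN_perm_right _ p2, c1, c2, hsplit]
      push_cast
      ring

theorem sum_map_natCast {α : Type} (l : List α) (g : α → Nat) :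
    (l.map (fun x => ((g x : Nat) : Int))).sum = ((l.map g).sum : Int) := by
  induction l with
  | nil => simp
  | cons b bs ih =>
    simp only [List.map_cons, List.sum_cons, ih]
    push_cast
    ring

theorem sum_countP_drop (v : List Int) :
    ((List.range v.length).map (fun i => (v.drop (i + 1)).countP (fun y => decide (y < v.getD i 0)))).sum = invN v := by
  induction v with
  | nil => simp [invN]
  | cons x xs ih =>
    rw [List.length_cons, List.range_succ_eq_map, List.map_cons, List.map_map, List.sum_cons]
    have hfun : ((fun i => ((x :: xs).drop (i + 1)).countP (fun y => decide (y < (x :: xs).getD i 0))) ∘ Nat.succ)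
        = fun i => (xs.drop (i + 1)).countP (fun y => decide (y < xs.getD i 0)) := by
      funext k
      simp [Function.comp, List.drop_succ_cons]
    rw [hfun, ih]
    simp [invN]

-- the column list A's pair loops read for a given col (B builds exactly this list)
def colL (a : List (List Int)) (col : Int) : List Int :=
  (PySem.List.pyRange 0 (((PySem.List.pyGetD a col []).length : Nat) : Int) 1).map
    (fun i => PySem.List.pyGetD (PySem.List.pyGetD a i []) col 0)

theorem invN_short (l : List Int) (h : l.length ≤ 1) : invN l = 0 := by
  match l, h with
  | [], _ => rfl
  | [x], _ => simp [invN]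

theorem innerfold (v : List Int) (x i : Int) (h0 : 0 ≤ i) (count : Int) :
    (PySem.List.pyRange (i + 1) (v.length : Int) 1).foldl
      (fun c j => if x > PySem.List.pyGetD v j 0 then c + 1 else c) count
    = count + ((v.drop (i.toNat + 1)).countP (fun y => decide (y < x)) : Int) := by
  rw [PySem.List.foldl_pyRange_pyGetD' v 0 (fun c y => if x > y then c + 1 else c) count (by omega)]
  rw [PySem.List.foldl_ite_add_one (fun y => x > y) _ count]
  have ht : (i + 1).toNat = i.toNat + 1 := by omega
  rw [ht]

-- the double pair loop over any list v counts exactly invN v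
theorem middle_general (v : List Int) (count : Int) :
    (PySem.List.pyRange 0 (v.length : Int) 1).foldl (fun count i =>
      (PySem.List.pyRange (i + 1) (v.length : Int) 1).foldl (fun c j =>
        if PySem.List.pyGetD v i 0 > PySem.List.pyGetD v j 0 then c + 1 else c) count) count
    = count + (invN v : Int) := by
  rw [PySem.List.foldl_congr_mem _ _
      (fun acc i => acc + ((v.drop (i.toNat + 1)).countP (fun y => decide (y < v.getD i.toNat 0)) : Int)) count ?_]
  · rw [PySem.List.foldl_add _ _ count, PySem.List.pyRange_zero_nat v.length, List.map_map]
    congr 1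
    have hfun : ∀ k ∈ List.range v.length,
        ((fun i : Int => (((v.drop (i.toNat + 1)).countP (fun y => decide (y < v.getD i.toNat 0)) : Nat) : Int)) ∘ (fun k : Nat => (k : Int))) k
        = (fun k : Nat => (((v.drop (k + 1)).countP (fun y => decide (y < v.getD k 0)) : Nat) : Int)) k := by
      intro k _
      simp only [Function.comp_apply, Int.toNat_natCast]
      rfl
    rw [List.map_congr_left hfun, sum_map_natCast (List.range v.length)
        (fun k => (v.drop (k + 1)).countP (fun y => decide (y < v.getD k 0))), sum_countP_drop]
  · intro acc i hi
    obtain ⟨hi0, hin⟩ := (PySem.List.mem_pyRange_one).mp hi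
    have hix : i.toNat < v.length := by omega
    dsimp only
    rw [innerfold v _ i hi0 acc]
    have hx : PySem.List.pyGetD v i 0 = v.getD i.toNat 0 := by
      rw [PySem.List.pyGetD_eq_getElem v 0 hi0 hin, List.getD_eq_getElem?_getD,
          List.getElem?_eq_getElem hix]
      rfl
    rw [hx]

theorem colstep (a : List (List Int)) (col : Int) (count : Int) :
    (PySem.List.pyRange 0 ((PySem.List.pyGetD a col []).length : Int) 1).foldl (fun count i =>
      (PySem.List.pyRange (i + 1) ((PySem.List.pyGetD a col []).length : Int) 1).foldl (fun c j =>
        if PySem.List.pyGetD (PySem.List.pyGetD a i []) col 0 >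
           PySem.List.pyGetD (PySem.List.pyGetD a j []) col 0 then c + 1 else c) count) count
    = count + (invN (colL a col) : Int) := by
  have hlen : ((PySem.List.pyGetD a col []).length : Int) = ((colL a col).length : Int) := by
    simp [colL, PySem.List.length_pyRange_one]
  rw [hlen]
  rw [PySem.List.foldl_congr_mem _ _
      (fun count i => (PySem.List.pyRange (i + 1) ((colL a col).length : Int) 1).foldl (fun c j =>
        if PySem.List.pyGetD (colL a col) i 0 > PySem.List.pyGetD (colL a col) j 0
        then c + 1 else c) count) count ?_]
  · exact middle_general (colL a col) count
  · intro acc i hi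
    obtain ⟨hi0, hin⟩ := (PySem.List.mem_pyRange_one).mp hi
    dsimp only
    have hxi : PySem.List.pyGetD (PySem.List.pyGetD a i []) col 0 = PySem.List.pyGetD (colL a col) i 0 := by
      simp only [colL]
      exact (PySem.List.pyGetD_map_pyRange_of_nonneg
        (fun i => PySem.List.pyGetD (PySem.List.pyGetD a i []) col 0)
        ((PySem.List.pyGetD a col []).length : Int) i 0 hi0 (by rw [← hlen] at hin; exact hin)).symm
    rw [hxi]
    rw [PySem.List.foldl_congr_mem _ _
      (fun c j => if PySem.List.pyGetD (colL a col) i 0 > PySem.List.pyGetD (colL a col) j 0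
                  then c + 1 else c) acc ?_]
    intro c j hj
    obtain ⟨hj0, hjn⟩ := (PySem.List.mem_pyRange_one).mp hj
    dsimp only
    have hxj : PySem.List.pyGetD (PySem.List.pyGetD a j []) col 0 = PySem.List.pyGetD (colL a col) j 0 := by
      simp only [colL]
      exact (PySem.List.pyGetD_map_pyRange_of_nonneg
        (fun i => PySem.List.pyGetD (PySem.List.pyGetD a i []) col 0)
        ((PySem.List.pyGetD a col []).length : Int) j 0 (by omega) (by rw [← hlen] at hjn; exact hjn)).symm
    rw [hxj]

theorem col_inv_eq (a : List (List Int)) :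
    col_inv a = 0 + ((PySem.List.pyRange 0 (a.length : Int) 1).map
      (fun col => (invN (colL a col) : Int))).sum := by
  unfold col_inv
  rw [PySem.List.foldl_congr_mem _ _ (fun acc col => acc + (invN (colL a col) : Int)) 0
      (fun acc col _ => colstep a col acc)]
  rw [PySem.List.foldl_add]

theorem col_inv_alt_eq (a : List (List Int)) :
    col_inv_alt a = 0 + ((PySem.List.pyRange 0 (a.length : Int) 1).map
      (fun col => (invN (colL a col) : Int))).sum := by
  unfold col_inv_alt
  rw [PySem.List.foldl_congr_mem _ _ (fun acc col => acc + (invN (colL a col) : Int)) 0 ?_]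
  · rw [PySem.List.foldl_add]
  · intro acc col _
    dsimp only
    by_cases h : (PySem.List.pyGetD a col []).length < 2
    · rw [if_pos h]
      have h0 : invN (colL a col) = 0 := by
        refine invN_short _ ?_
        simp only [colL, List.length_map, PySem.List.length_pyRange_one]
        omega
      rw [h0]
      simp
    · rw [if_neg h, (sortCount_main _).2.2]
      simp only [colL]

-- ===== VERDICT (by name: the statement is the Claim_ definition above) =====
theorem col_inv_spec : Claim_equal_col_inv := by
  intro a _ _
  unfold Spec_col_inv
  rw [col_inv_eq a, col_inv_alt_eq a]
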